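-- pv_equiv track=rewrite | github.com/sbh7435/python | ep/ep1.py | sandwich
-- ===== SOURCE A (Python) =====
-- def sandwich(n):
--     """ Returns True if n contains a sandwich else return False
--     >>> sandwich(416263) # 626
--     True
--     >>> sandwich(5050) # 505 or 050
--     True
--     >>> sandwich(4441) # 444
--     True
--     >>> sandwich(55)
--     False
--     >>> sandwich(4456)
--     False
--     """
--     tens, ones = (n // 10) % 10, n % 10
--     n = n // 100
--     while n > 0:
--         if n % 10 == ones:
--             return True
--         else:
--             tens, ones = n % 10, tens
--             n = n // 10
--     return False
-- ===== SOURCE B (Python) =====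
-- def sandwich(n):
--     m = n
--     digits = []
--     while m > 0:
--         digits.append(m % 10)
--         m //= 10
--     return any(a == c for a, c in zip(digits, digits[2:]))
-- ===== Notes on version B (the rewrite author's own statement) =====
-- stated objective: simpler
-- what changed: B extracts all digits into a list once and then checks d[i]==d[i+2] with a single zip/any pass, instead of A's fused loop that threads a (tens, ones) sliding window through the division loop with an early return.
import Mathlib
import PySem

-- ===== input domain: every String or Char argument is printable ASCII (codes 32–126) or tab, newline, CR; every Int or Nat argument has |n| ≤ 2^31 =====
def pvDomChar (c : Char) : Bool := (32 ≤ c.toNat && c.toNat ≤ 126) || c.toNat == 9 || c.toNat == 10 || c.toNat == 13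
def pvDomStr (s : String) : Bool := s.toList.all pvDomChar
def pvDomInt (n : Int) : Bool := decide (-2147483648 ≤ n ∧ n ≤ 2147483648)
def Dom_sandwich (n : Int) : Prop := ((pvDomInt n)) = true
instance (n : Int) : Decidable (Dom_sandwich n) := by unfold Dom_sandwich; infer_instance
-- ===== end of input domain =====

-- B extracts all digits into a list once and checks d[i]==d[i+2] in a separate zip/any pass,
-- instead of A's fused division loop threading a (tens, ones) window; objective: simpler.


-- termination helper for both ports' while-loops (m // 10 shrinks; cited by decreasing_by)
theorem pvDiv10_lt (m : Int) (h : 0 < m) :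
    (PySem.Int.floordiv m 10).toNat < m.toNat := by
  rw [PySem.Int.floordiv_eq_ediv_of_pos (by omega)]
  omega

-- ===== PORT A =====
-- the while-loop of A: state (n, tens, ones), early return True inside
def sandwichLoop (m tens ones : Int) : Bool :=
  if h : 0 < m then
    if PySem.Int.mod m 10 == ones then true
    else sandwichLoop (PySem.Int.floordiv m 10) (PySem.Int.mod m 10) tens
  else false
termination_by m.toNat
decreasing_by exact pvDiv10_lt m h

def sandwich (n : Int) : Bool :=
  let tens := PySem.Int.mod (PySem.Int.floordiv n 10) 10
  let ones := PySem.Int.mod n 10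
  sandwichLoop (PySem.Int.floordiv n 100) tens ones

-- ===== PORT B =====
-- the while-loop of B: append m % 10 to the end of the list, m //= 10
def digitsLoop (m : Int) (acc : List Int) : List Int :=
  if h : 0 < m then digitsLoop (PySem.Int.floordiv m 10) (acc ++ [PySem.Int.mod m 10])
  else acc
termination_by m.toNat
decreasing_by exact pvDiv10_lt m h

def sandwich_alt (n : Int) : Bool :=
  let digits := digitsLoop n []
  (digits.zip (digits.drop 2)).any (fun p => p.1 == p.2)

-- ===== PRECONDITION & SPEC =====
def Spec_sandwich (n : Int) (out : Bool) : Prop := out = sandwich_alt n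
instance (n : Int) (out : Bool) : Decidable (Spec_sandwich n out) := by unfold Spec_sandwich; infer_instance

-- ===== CLAIM (what is proved, stated in full; the proofs are below) =====
def Claim_equal_sandwich : Prop := ∀ (n : Int), Dom_sandwich n → Spec_sandwich n (sandwich n)

-- ===== LEMMAS AND PROOFS =====

-- pure (cons-form) digit list, used only in the proof
def pvDigits (m : Int) : List Int :=
  if h : 0 < m then PySem.Int.mod m 10 :: pvDigits (PySem.Int.floordiv m 10)
  else []
termination_by m.toNat
decreasing_by exact pvDiv10_lt m h

theorem digitsLoop_eq (m : Int) (acc : List Int) :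
    digitsLoop m acc = acc ++ pvDigits m := by
  by_cases h : 0 < m
  · rw [digitsLoop, pvDigits, dif_pos h, dif_pos h,
      digitsLoop_eq (PySem.Int.floordiv m 10)]
    simp
  · rw [digitsLoop, pvDigits, dif_neg h, dif_neg h]; simp
termination_by m.toNat
decreasing_by exact pvDiv10_lt m h

-- B's check on a two-element prefix plus the digit list of m equals A's loop
def pvCheck (l : List Int) : Bool := (l.zip (l.drop 2)).any (fun p => p.1 == p.2)

theorem loop_eq_check (m tens ones : Int) :
    sandwichLoop m tens ones = pvCheck (ones :: tens :: pvDigits m) := by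
  by_cases h : 0 < m
  · rw [sandwichLoop, dif_pos h, pvDigits, dif_pos h]
    rw [loop_eq_check (PySem.Int.floordiv m 10) (PySem.Int.mod m 10) tens]
    simp only [pvCheck, List.drop, List.zip_cons_cons, List.any_cons]
    rw [Bool.beq_comm (a := PySem.Int.mod m 10)]
    cases ones == PySem.Int.mod m 10 <;> simp
  · rw [sandwichLoop, dif_neg h, pvDigits, dif_neg h]
    simp [pvCheck]
termination_by m.toNat
decreasing_by exact pvDiv10_lt m h

-- mod/floordiv of n line up with the first two entries of pvDigits n when they exist
theorem digits_head (n : Int) (h : 0 < n) :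
    pvDigits n = PySem.Int.mod n 10 :: pvDigits (PySem.Int.floordiv n 10) := by
  rw [pvDigits, dif_pos h]

theorem check_short (l : List Int) (h : l.length ≤ 2) : pvCheck l = false := by
  match l, h with
  | [], _ => simp [pvCheck]
  | [a], _ => simp [pvCheck]
  | [a, b], _ => simp [pvCheck]

theorem floordiv_floordiv (n : Int) :
    PySem.Int.floordiv (PySem.Int.floordiv n 10) 10 = PySem.Int.floordiv n 100 := by
  rw [PySem.Int.floordiv_eq_ediv_of_pos (a := n) (by omega),
      PySem.Int.floordiv_eq_ediv_of_pos (by omega),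
      PySem.Int.floordiv_eq_ediv_of_pos (by omega)]
  omega

-- ===== VERDICT (by name: the statement is the Claim_ definition above) =====
theorem sandwich_spec : Claim_equal_sandwich := by
  intro n _
  unfold Spec_sandwich sandwich sandwich_alt
  rw [digitsLoop_eq, List.nil_append]
  show sandwichLoop _ _ _ = pvCheck (pvDigits n)
  by_cases h1 : 0 < n
  · rw [digits_head n h1]
    by_cases h2 : 0 < PySem.Int.floordiv n 10
    · rw [digits_head _ h2, loop_eq_check, floordiv_floordiv]
    · -- n < 100: pvDigits (n // 10) = [], both sides are false
      have hd : pvDigits (PySem.Int.floordiv n 10) = [] := by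
        rw [pvDigits, dif_neg h2]
      rw [hd, loop_eq_check]
      have h100 : ¬ 0 < PySem.Int.floordiv n 100 := by
        rw [PySem.Int.floordiv_eq_ediv_of_pos (by omega)]
        rw [PySem.Int.floordiv_eq_ediv_of_pos (by omega)] at h2
        omega
      have : pvDigits (PySem.Int.floordiv n 100) = [] := by
        rw [pvDigits, dif_neg h100]
      rw [this, check_short _ (by simp), check_short _ (by simp)]
  · have hd : pvDigits n = [] := by rw [pvDigits, dif_neg h1]
    have h100 : ¬ 0 < PySem.Int.floordiv n 100 := by
      rw [PySem.Int.floordiv_eq_ediv_of_pos (by omega)]; omega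
    rw [hd, loop_eq_check, pvDigits, dif_neg h100,
        check_short _ (by simp), check_short _ (by simp)]
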